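-- pv_equiv track=rewrite | github.com/JFIA/python-demos-for-nlp | parse_email.py | build_email_feature
-- ===== SOURCE A (Python) =====
-- def parse_email(email):
--     count_url = 0
--     count_atta = 0
--     email_feature = [0, 0]
--     for item in email:
--         if ('<head>' in item) | ('<body>' in item):
--             email_feature[0] = 1
--         if ('<script>') in item:
--             email_feature[1] = 1
--         if ('http://') in item:
--             count_url += 1
--         if 'Content-Disposition: attachment' in item:
--             count_atta += 1
--     email_feature.append(count_url)
--     email_feature.append(count_atta)
--     return email_feature
--
-- def build_email_feature(pure_email, vec_feature):   # vec_feature是word2vec产生的特征值。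
--     email_feature = []
--     for item in pure_email:
--         feature = parse_email(item)
--         email_feature.append(feature)
--     for i in range(len(email_feature)):
--         for j in range(len(vec_feature[i])):
--             email_feature[i].append(vec_feature[i][j])
--     return email_feature
-- ===== SOURCE B (Python) =====
-- def build_email_feature(pure_email, vec_feature):
--     result = []
--     for item, vec in zip(pure_email, vec_feature):
--         flag_html = 1 if any(('<head>' in s) or ('<body>' in s) for s in item) else 0
--         flag_script = 1 if any('<script>' in s for s in item) else 0
--         count_url = sum(1 for s in item if 'http://' in s)
--         count_atta = sum(1 for s in item if 'Content-Disposition: attachment' in s)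
--         result.append([flag_html, flag_script, count_url, count_atta] + list(vec))
--     return result
-- ===== Notes on version B (the rewrite author's own statement) =====
-- stated objective: idiomatic
-- what changed: Replaces parse_email's single fused mutating pass and the separate index-based vector-append loop with a zip over (email, vector) pairs computing each feature by its own scan (two any's and two sum's) and building each row in one expression; Pre_ excludes inputs where A raises IndexError (vec_feature shorter than pure_email).
import Mathlib
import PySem

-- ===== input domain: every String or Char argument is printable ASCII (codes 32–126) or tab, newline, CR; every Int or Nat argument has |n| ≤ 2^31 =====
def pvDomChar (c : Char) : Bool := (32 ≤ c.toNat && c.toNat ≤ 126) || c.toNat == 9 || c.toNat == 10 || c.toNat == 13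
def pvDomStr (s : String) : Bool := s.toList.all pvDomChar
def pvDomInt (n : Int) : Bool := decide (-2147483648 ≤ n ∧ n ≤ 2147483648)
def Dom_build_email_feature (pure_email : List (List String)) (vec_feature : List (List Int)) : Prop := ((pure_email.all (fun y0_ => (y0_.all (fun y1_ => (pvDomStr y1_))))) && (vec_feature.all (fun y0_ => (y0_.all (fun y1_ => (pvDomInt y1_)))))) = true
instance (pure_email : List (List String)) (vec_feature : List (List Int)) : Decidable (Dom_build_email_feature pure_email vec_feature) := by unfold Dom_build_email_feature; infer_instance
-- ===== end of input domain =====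

-- B is the same extraction written idiomatically: a zip over (email, vector) pairs, each
-- feature computed by its own scan, each row built in one expression (no in-place mutation).

-- ===== PORT A =====
-- parse_email: one fused pass mutating a 4-slot list; ported as a foldl over a quadruple.
def pvParseEmail (email : List String) : List Int :=
  let st := email.foldl (fun st item =>
    let e0 := if PySem.Str.isIn "<head>" item || PySem.Str.isIn "<body>" item then (1 : Int) else st.1
    let e1 := if PySem.Str.isIn "<script>" item then (1 : Int) else st.2.1
    let cu := if PySem.Str.isIn "http://" item then st.2.2.1 + 1 else st.2.2.1
    let ca := if PySem.Str.isIn "Content-Disposition: attachment" item then st.2.2.2 + 1 else st.2.2.2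
    (e0, e1, cu, ca)) ((0 : Int), (0 : Int), (0 : Int), (0 : Int))
  [st.1, st.2.1, st.2.2.1, st.2.2.2]

def build_email_feature (pure_email : List (List String)) (vec_feature : List (List Int)) : List (List Int) :=
  let email_feature := pure_email.foldl (fun acc item => acc ++ [pvParseEmail item]) []
  (PySem.List.pyRange 0 email_feature.length 1).foldl (fun ef i =>
    let vi := (PySem.List.pyGet? vec_feature i).getD []
    (PySem.List.pyRange 0 vi.length 1).foldl (fun ef j =>
      ef.set i.toNat (((PySem.List.pyGet? ef i).getD []) ++ [(PySem.List.pyGet? vi j).getD 0])) ef)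
    email_feature

-- ===== PORT B =====
def pvRow (item : List String) (vec : List Int) : List Int :=
  let flag_html : Int := if item.any (fun s => PySem.Str.isIn "<head>" s || PySem.Str.isIn "<body>" s) then 1 else 0
  let flag_script : Int := if item.any (fun s => PySem.Str.isIn "<script>" s) then 1 else 0
  let count_url : Int := ((item.filter (fun s => PySem.Str.isIn "http://" s)).map (fun _ => (1 : Int))).sum
  let count_atta : Int := ((item.filter (fun s => PySem.Str.isIn "Content-Disposition: attachment" s)).map (fun _ => (1 : Int))).sum
  [flag_html, flag_script, count_url, count_atta] ++ vec

def build_email_feature_alt (pure_email : List (List String)) (vec_feature : List (List Int)) : List (List Int) :=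
  (pure_email.zip vec_feature).foldl (fun res p => res ++ [pvRow p.1 p.2]) []

-- ===== PRECONDITION & SPEC =====
-- Pre_ excludes exactly the inputs where A raises IndexError (vec_feature shorter than pure_email).
def Pre_build_email_feature (pure_email : List (List String)) (vec_feature : List (List Int)) : Prop :=
  pure_email.length ≤ vec_feature.length
instance (pure_email : List (List String)) (vec_feature : List (List Int)) : Decidable (Pre_build_email_feature pure_email vec_feature) := by unfold Pre_build_email_feature; infer_instance

def pvWitness_build_email_feature : List (List String) × List (List Int) :=
  ([["<head>x", "http://a"], ["y"]], [[7, -2], [3]])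

def Spec_build_email_feature (pure_email : List (List String)) (vec_feature : List (List Int)) (out : List (List Int)) : Prop := out = build_email_feature_alt pure_email vec_feature
instance (pure_email : List (List String)) (vec_feature : List (List Int)) (out : List (List Int)) : Decidable (Spec_build_email_feature pure_email vec_feature out) := by unfold Spec_build_email_feature; infer_instance

-- ===== CLAIM (what is proved, stated in full; the proofs are below) =====
def Claim_equal_build_email_feature : Prop := ∀ (pure_email : List (List String)) (vec_feature : List (List Int)), Dom_build_email_feature pure_email vec_feature → Pre_build_email_feature pure_email vec_feature → Spec_build_email_feature pure_email vec_feature (build_email_feature pure_email vec_feature)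

-- ===== LEMMAS AND PROOFS =====

-- inner loop
lemma pvInner (vi : List Int) (k : Nat) : ∀ (n : Nat), n ≤ vi.length → ∀ (ef : List (List Int)), (hk : k < ef.length) →
    (PySem.List.pyRange 0 (n : Int) 1).foldl (fun ef j =>
      ef.set ((k : Int)).toNat (((PySem.List.pyGet? ef (k : Int)).getD []) ++ [(PySem.List.pyGet? vi j).getD 0])) ef
    = ef.set k (ef[k] ++ vi.take n) := by
  intro n
  induction n with
  | zero => intro _ ef hk; simp
  | succ n ih =>
    intro hn ef hk
    have h1 : PySem.List.pyRange 0 ((n+1 : Nat) : Int) 1 = PySem.List.pyRange 0 (n : Int) 1 ++ [(n : Int)] := by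
      push_cast
      exact PySem.List.pyRange_one_succ_right (by omega)
    rw [h1, List.foldl_append, ih (by omega) ef hk]
    simp only [List.foldl]
    have hset : k < (ef.set k (ef[k] ++ vi.take n)).length := by simpa using hk
    have hg : (PySem.List.pyGet? (ef.set k (ef[k] ++ vi.take n)) (k : Int)).getD [] = ef[k] ++ vi.take n := by
      simp [PySem.List.pyGet?_natCast, List.getElem?_set_self, hk]
    have hv : (PySem.List.pyGet? vi (n : Int)).getD 0 = vi[n] := by
      rw [PySem.List.pyGet?_natCast, List.getElem?_eq_getElem (by omega : n < vi.length)]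
      rfl
    rw [hg, hv]
    simp only [Int.toNat_natCast]
    rw [List.set_set, List.take_add_one, List.getElem?_eq_getElem (by omega : n < vi.length)]
    simp

lemma pvOuter (vf : List (List Int)) (ef : List (List Int)) (hlen : ef.length ≤ vf.length) :
    ∀ (m : Nat), m ≤ ef.length →
    (PySem.List.pyRange 0 (m : Int) 1).foldl (fun ef i =>
      let vi := (PySem.List.pyGet? vf i).getD []
      (PySem.List.pyRange 0 (vi.length : Int) 1).foldl (fun ef j =>
        ef.set i.toNat (((PySem.List.pyGet? ef i).getD []) ++ [(PySem.List.pyGet? vi j).getD 0])) ef) ef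
    = (List.zipWith (· ++ ·) (ef.take m) (vf.take m)) ++ ef.drop m := by
  intro m
  induction m with
  | zero => intro _; simp
  | succ m ih =>
    intro hm
    have h1 : PySem.List.pyRange 0 ((m+1 : Nat) : Int) 1 = PySem.List.pyRange 0 (m : Int) 1 ++ [(m : Int)] := by
      push_cast; exact PySem.List.pyRange_one_succ_right (by omega)
    rw [h1, List.foldl_append, ih (by omega)]
    simp only [List.foldl]
    have hzwl : (List.zipWith (· ++ ·) (ef.take m) (vf.take m)).length = m := by
      simp; omega
    have heml : (List.zipWith (· ++ ·) (ef.take m) (vf.take m) ++ ef.drop m).length = ef.length := by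
      simp; omega
    have hmv : m < vf.length := by omega
    have hvi : (PySem.List.pyGet? vf (m : Int)).getD [] = vf[m] := by
      rw [PySem.List.pyGet?_natCast, List.getElem?_eq_getElem hmv]; rfl
    rw [hvi]
    rw [pvInner vf[m] m vf[m].length (le_refl _) _ (by omega)]
    rw [List.take_length]
    apply List.ext_getElem
    · simp; omega
    · intro i hi1 hi2
      have hil : i < ef.length := by
        rw [List.length_set, heml] at hi1; exact hi1
      rw [List.getElem_set]
      have hzwl1 : (List.zipWith (· ++ ·) (ef.take (m+1)) (vf.take (m+1))).length = m+1 := by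
        simp; omega
      have hminm : min ef.length (min m vf.length) = m := by omega
      have hminm1 : min ef.length (min (m+1) vf.length) = m+1 := by omega
      by_cases him : m = i
      · subst him
        rw [if_pos rfl]
        rw [List.getElem_append_right (by rw [hzwl]), List.getElem_drop]
        rw [List.getElem_append_left (by rw [hzwl1]; omega), List.getElem_zipWith]
        simp [List.getElem_take, hminm]
      · rw [if_neg him]
        simp only [List.getElem_append, List.getElem_zipWith, List.getElem_take,
          List.getElem_drop, List.length_zipWith, List.length_take, hminm, hminm1]
        split
        · split
          · rfl
          · omega
        · split
          · omega
          · have hidx : m + (i - min ef.length (min m vf.length))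
                = m + 1 + (i - min ef.length (min (m + 1) vf.length)) := by omega
            simp [hidx]

lemma pvIfOr (u v : Bool) (a : Int) :
    (if v = true then (1:Int) else if u = true then 1 else a) = if (u || v) = true then 1 else a := by
  cases u <;> cases v <;> simp

lemma pvIfCount (u : Bool) (c : Int) (n : Nat) :
    (if u = true then c + 1 else c) + (n : Int) = c + ((n + if u = true then 1 else 0 : Nat) : Int) := by
  cases u <;> simp <;> push_cast <;> ring

lemma pvParseFold (email : List String) : ∀ a b c d : Int,
    email.foldl (fun st item =>
      let e0 := if PySem.Str.isIn "<head>" item || PySem.Str.isIn "<body>" item then (1 : Int) else st.1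
      let e1 := if PySem.Str.isIn "<script>" item then (1 : Int) else st.2.1
      let cu := if PySem.Str.isIn "http://" item then st.2.2.1 + 1 else st.2.2.1
      let ca := if PySem.Str.isIn "Content-Disposition: attachment" item then st.2.2.2 + 1 else st.2.2.2
      (e0, e1, cu, ca)) (a, b, c, d)
    = ((if email.any (fun s => PySem.Str.isIn "<head>" s || PySem.Str.isIn "<body>" s) then 1 else a),
       (if email.any (fun s => PySem.Str.isIn "<script>" s) then 1 else b),
       c + (email.countP (fun s => PySem.Str.isIn "http://" s) : Int),
       d + (email.countP (fun s => PySem.Str.isIn "Content-Disposition: attachment" s) : Int)) := by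
  induction email with
  | nil => intro a b c d; simp
  | cons x t ih =>
    intro a b c d
    rw [List.foldl_cons, ih]
    simp only [List.any_cons, List.countP_cons, Prod.mk.injEq]
    refine ⟨pvIfOr _ _ _, pvIfOr _ _ _, pvIfCount _ _ _, pvIfCount _ _ _⟩

lemma pvSumOnes (l : List String) (p : String → Bool) :
    ((l.filter p).map (fun _ => (1:Int))).sum = (l.countP p : Int) := by
  rw [List.map_const']; simp [List.countP_eq_length_filter]

lemma pvRowEq (item : List String) (vec : List Int) : pvParseEmail item ++ vec = pvRow item vec := by
  unfold pvParseEmail pvRow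
  rw [pvParseFold]
  rw [pvSumOnes, pvSumOnes]
  simp only [zero_add]

lemma pvZipWithRow (pe : List (List String)) (vf : List (List Int)) :
    List.zipWith (fun x y => pvParseEmail x ++ y) pe vf = List.zipWith pvRow pe vf := by
  induction pe generalizing vf with
  | nil => simp
  | cons x t ih => cases vf <;> simp [ih, pvRowEq]

lemma pvZipMap (l : List (List String)) (l' : List (List Int)) (f : List String → List Int → List Int) :
    (l.zip l').map (fun p => f p.1 p.2) = List.zipWith f l l' := by
  induction l generalizing l' with
  | nil => simp
  | cons x t ih => cases l' <;> simp [ih]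

lemma pvZipWithTake (a : List (List Int)) (b : List (List Int)) :
    List.zipWith (· ++ ·) a (List.take a.length b) = List.zipWith (· ++ ·) a b := by
  induction a generalizing b with
  | nil => simp
  | cons x t ih => cases b <;> simp [ih]

theorem build_email_feature_spec : Claim_equal_build_email_feature := by
  intro pe vf _ hpre
  unfold Spec_build_email_feature build_email_feature build_email_feature_alt Pre_build_email_feature at *
  simp only [PySem.List.foldl_append_singleton_eq_map, List.nil_append, List.length_map]
  have hlen : (pe.map pvParseEmail).length ≤ vf.length := by simpa using hpre
  have hout := pvOuter vf (pe.map pvParseEmail) hlen (pe.map pvParseEmail).length (le_refl _)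
  rw [List.length_map] at hout
  rw [hout]
  rw [List.take_of_length_le (by simp : (pe.map pvParseEmail).length ≤ pe.length),
      List.drop_eq_nil_of_le (by simp : (pe.map pvParseEmail).length ≤ pe.length), List.append_nil]
  rw [pvZipMap]
  have h2 : List.take pe.length vf = List.take (pe.map pvParseEmail).length vf := by
    rw [List.length_map]
  rw [h2, pvZipWithTake, List.zipWith_map_left]
  exact pvZipWithRow pe vf
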